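-- pv_equiv track=rewrite | github.com/thstasy/Game_theory | hierarchy_package.py | L_distribution
-- ===== SOURCE A (Python) =====
-- def L_distribution(L_i, S_i, n):
--     Level_num = []         #distribution of levels, form: ['level','#total','#C','#D']
--
--     sim_L = sorted(list(set(L_i)))
--     for k in range(len(sim_L)):
--         Level_num.append([sim_L[k], 0, 0, 0])
--
--     sort_L = sorted(L_i) ; k=0
--     for i in range(len(L_i)):
--         if sim_L[k] == sort_L[i]:
--             Level_num[k][1] += 1
--         else:
--             k += 1
--             Level_num[k][1] += 1
--
--         if S_i[i] == 'C':
--             Level_num[k][2] += 1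
--         elif S_i[i] == 'D':
--             Level_num[k][3] += 1
--         else:
--             raise ValueError('State must be "C" or "D"')
--
--     return Level_num
-- ===== SOURCE B (Python) =====
-- def L_distribution(L_i, S_i, n):
--     # totals: a frequency table over the levels
--     freq = {}
--     for lev in L_i:
--         freq[lev] = freq.get(lev, 0) + 1
--     # C/D tallies keyed by the sorted level value, paired positionally with S_i
--     srt = sorted(L_i)
--     c_cnt = {}
--     d_cnt = {}
--     for i in range(len(L_i)):
--         lev = srt[i]
--         state = S_i[i]
--         if state == 'C':
--             c_cnt[lev] = c_cnt.get(lev, 0) + 1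
--         elif state == 'D':
--             d_cnt[lev] = d_cnt.get(lev, 0) + 1
--         else:
--             raise ValueError('State must be "C" or "D"')
--     return [[lev, freq[lev], c_cnt.get(lev, 0), d_cnt.get(lev, 0)]
--             for lev in sorted(set(L_i))]
-- ===== Notes on version B (the rewrite author's own statement) =====
-- stated objective: alternative
-- what changed: A's single sorted scan with a manually advanced pointer k into parallel rows is replaced by a frequency-table pass over L_i for the totals plus a separate positional pass tallying C/D into dicts keyed by the sorted level, with rows emitted over sorted(set(L_i)).
import Mathlib
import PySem

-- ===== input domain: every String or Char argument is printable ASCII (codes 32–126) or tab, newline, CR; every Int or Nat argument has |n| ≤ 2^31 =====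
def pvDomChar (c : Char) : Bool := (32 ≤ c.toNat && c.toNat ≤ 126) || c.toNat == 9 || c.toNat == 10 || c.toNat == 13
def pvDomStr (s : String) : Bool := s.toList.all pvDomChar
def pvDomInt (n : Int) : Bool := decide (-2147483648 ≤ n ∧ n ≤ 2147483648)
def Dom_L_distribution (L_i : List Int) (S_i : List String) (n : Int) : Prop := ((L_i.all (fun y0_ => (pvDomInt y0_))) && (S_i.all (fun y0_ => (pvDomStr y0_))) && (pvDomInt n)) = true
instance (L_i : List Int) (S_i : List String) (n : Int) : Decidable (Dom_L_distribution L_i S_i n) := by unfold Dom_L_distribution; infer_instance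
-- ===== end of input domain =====

-- B replaces A's manual k-advance pointer over parallel sorted lists by a frequency table for the
-- totals plus level-keyed dicts for the C/D tallies (objective: alternative decomposition, same cost).


-- ===== PORT A =====
-- one iteration of A's loop body, over the pair (sort_L[i], S_i[i]); st = (Level_num, k)
def pvStepA (simL : List Int) (st : List (List Int) × Nat) (p : Int × String) :
    List (List Int) × Nat :=
  let k := if simL.getD st.2 0 = p.1 then st.2 else st.2 + 1
  let rows := st.1.modify k (fun r => r.modify 1 (· + 1))
  let rows := if p.2 = "C" then rows.modify k (fun r => r.modify 2 (· + 1))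
    else if p.2 = "D" then rows.modify k (fun r => r.modify 3 (· + 1))
    else rows
  (rows, k)

def L_distribution (L_i : List Int) (S_i : List String) (n : Int) : List (List Int) :=
  let sim_L := PySem.List.sorted (PySem.Set.ofList L_i) (fun x => x) false
  let level_num := (List.range sim_L.length).foldl
    (fun acc k => acc ++ [[sim_L.getD k 0, 0, 0, 0]]) []
  let sort_L := PySem.List.sorted L_i (fun x => x) false
  -- sort_L[i] is always in range; S_i[i] is in range on Pre_ (getD keeps the port total;
  -- in the else branch Python raises ValueError — outside Pre_ — and the port leaves rows unchanged)
  ((List.range L_i.length).foldl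
    (fun st i => pvStepA sim_L st (sort_L.getD i 0, S_i.getD i "")) (level_num, 0)).1

-- ===== PORT B =====
def L_distribution_alt (L_i : List Int) (S_i : List String) (n : Int) : List (List Int) :=
  let freq := L_i.foldl (fun d lev => d.insert lev (d.getD lev 0 + 1)) PySem.Dict.empty
  let srt := PySem.List.sorted L_i (fun x => x) false
  -- srt[i] is always in range; S_i[i] is in range on Pre_ (getD keeps the port total;
  -- in the else branch Python raises ValueError — outside Pre_ — and the port leaves the dicts unchanged)
  let cd := (List.range L_i.length).foldl
    (fun (st : PySem.Dict Int Int × PySem.Dict Int Int) i =>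
      if S_i.getD i "" = "C" then (st.1.modify (srt.getD i 0) 0 (· + 1), st.2)
      else if S_i.getD i "" = "D" then (st.1, st.2.modify (srt.getD i 0) 0 (· + 1))
      else st)
    (PySem.Dict.empty, PySem.Dict.empty)
  (PySem.List.sorted (PySem.Set.ofList L_i) (fun x => x) false).map
    (fun lev => [lev, freq.getD lev 0, cd.1.getD lev 0, cd.2.getD lev 0])

-- ===== PRECONDITION & SPEC =====
-- Pre_ excludes exactly the inputs on which Python A raises: IndexError when S_i is shorter than
-- L_i, and ValueError when a used state is neither "C" nor "D" (B raises identically there).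
def Pre_L_distribution (L_i : List Int) (S_i : List String) (n : Int) : Prop :=
  L_i.length ≤ S_i.length ∧ ∀ s ∈ S_i.take L_i.length, s = "C" ∨ s = "D"
instance (L_i : List Int) (S_i : List String) (n : Int) : Decidable (Pre_L_distribution L_i S_i n) := by
  unfold Pre_L_distribution; infer_instance
def pvWitness_L_distribution : List Int × List String × Int := ([2, 1, 2], ["C", "D", "C"], 3)

def Spec_L_distribution (L_i : List Int) (S_i : List String) (n : Int) (out : List (List Int)) : Prop := out = L_distribution_alt L_i S_i n
instance (L_i : List Int) (S_i : List String) (n : Int) (out : List (List Int)) : Decidable (Spec_L_distribution L_i S_i n out) := by unfold Spec_L_distribution; infer_instance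

-- ===== CLAIM (what is proved, stated in full; the proofs are below) =====
def Claim_equal_L_distribution : Prop := ∀ (L_i : List Int) (S_i : List String) (n : Int), Dom_L_distribution L_i S_i n → Pre_L_distribution L_i S_i n → Spec_L_distribution L_i S_i n (L_distribution L_i S_i n)

-- ===== LEMMAS AND PROOFS =====

-- the pair stream both loops consume: (sort_L[i], S_i[i]) for i in range(len L_i)
def pvPairs (L_i : List Int) (S_i : List String) : List (Int × String) :=
  (List.range L_i.length).map
    (fun i => ((PySem.List.sorted L_i (fun x => x) false).getD i 0, S_i.getD i ""))

def cntT (v : Int) (rem : List (Int × String)) : Int := ((rem.map Prod.fst).count v : Int)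
def cntC (v : Int) (rem : List (Int × String)) : Int :=
  (((rem.filter (fun p => decide (p.2 = "C"))).map Prod.fst).count v : Int)
def cntD (v : Int) (rem : List (Int × String)) : Int :=
  (((rem.filter (fun p => decide (p.2 = "D"))).map Prod.fst).count v : Int)

lemma cntT_cons (x : Int) (s : String) (rem : List (Int × String)) (v : Int) :
    cntT v ((x, s) :: rem) = cntT v rem + (if x = v then 1 else 0) := by
  simp [cntT, List.count_cons]

lemma cntC_cons (x : Int) (s : String) (rem : List (Int × String)) (v : Int) :
    cntC v ((x, s) :: rem) = cntC v rem + (if x = v ∧ s = "C" then 1 else 0) := by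
  simp only [cntC, List.filter_cons]
  by_cases hs : s = "C" <;> by_cases hx : x = v <;>
    simp [hs, hx, List.count_cons]

lemma cntD_cons (x : Int) (s : String) (rem : List (Int × String)) (v : Int) :
    cntD v ((x, s) :: rem) = cntD v rem + (if x = v ∧ s = "D" then 1 else 0) := by
  simp only [cntD, List.filter_cons]
  by_cases hs : s = "D" <;> by_cases hx : x = v <;>
    simp [hs, hx, List.count_cons]

lemma cntT_zero (v : Int) (rem : List (Int × String)) (h : v ∉ rem.map Prod.fst) :
    cntT v rem = 0 := by
  simp [cntT, List.count_eq_zero.mpr h]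

lemma cntC_zero (v : Int) (rem : List (Int × String)) (h : v ∉ rem.map Prod.fst) :
    cntC v rem = 0 := by
  have : v ∉ (rem.filter (fun p => decide (p.2 = "C"))).map Prod.fst := by
    intro hv; exact h (by
      obtain ⟨p, hp, rfl⟩ := List.mem_map.mp hv
      exact List.mem_map.mpr ⟨p, (List.mem_filter.mp hp).1, rfl⟩)
  simp [cntC, List.count_eq_zero.mpr this]

lemma cntD_zero (v : Int) (rem : List (Int × String)) (h : v ∉ rem.map Prod.fst) :
    cntD v rem = 0 := by
  have : v ∉ (rem.filter (fun p => decide (p.2 = "D"))).map Prod.fst := by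
    intro hv; exact h (by
      obtain ⟨p, hp, rfl⟩ := List.mem_map.mp hv
      exact List.mem_map.mpr ⟨p, (List.mem_filter.mp hp).1, rfl⟩)
  simp [cntD, List.count_eq_zero.mpr this]

lemma pv_getD_append (pre : List Int) (v : Int) (rest : List Int) (d : Int) :
    (pre ++ v :: rest).getD pre.length d = v := by
  simp [List.getD_eq_getElem?_getD]

lemma pv_modify_append {α : Type} (done : List α) (r : α) (tail : List α) (f : α → α) :
    (done ++ r :: tail).modify done.length f = done ++ f r :: tail := by
  induction done with
  | nil => rfl
  | cons a as ih => simpa [List.modify] using congrArg (a :: ·) ih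

lemma pvRow1 (v t c d : Int) (f : Int → Int) : ([v, t, c, d] : List Int).modify 1 f = [v, f t, c, d] := rfl
lemma pvRow2 (v t c d : Int) (f : Int → Int) : ([v, t, c, d] : List Int).modify 2 f = [v, t, f c, d] := rfl
lemma pvRow3 (v t c d : Int) (f : Int → Int) : ([v, t, c, d] : List Int).modify 3 f = [v, t, c, f d] := rfl

-- the rows produced by A's pointer loop, characterised by counts over the remaining pair stream
lemma pv_loopA (rem : List (Int × String)) :
    ∀ (pre : List Int) (v : Int) (rest : List Int) (done : List (List Int)) (t c d : Int),
    done.length = pre.length →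
    (rem.map Prod.fst).Pairwise (· ≤ ·) →
    (∀ p ∈ rem, p.1 = v ∨ p.1 ∈ rest) →
    (∀ u ∈ rest, u ∈ rem.map Prod.fst) →
    (v :: rest).Pairwise (· < ·) →
    (rem.foldl (pvStepA (pre ++ v :: rest))
        (done ++ [v, t, c, d] :: rest.map (fun u => [u, 0, 0, 0]), pre.length)).1
      = done ++ [v, t + cntT v rem, c + cntC v rem, d + cntD v rem]
          :: rest.map (fun u => [u, cntT u rem, cntC u rem, cntD u rem]) := by
  induction rem with
  | nil =>
    intro pre v rest done t c d hlen hsort hmem hsub hlt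
    have hrest : rest = [] :=
      List.eq_nil_iff_forall_not_mem.mpr (fun u hu => by simpa using hsub u hu)
    subst hrest
    simp [cntT, cntC, cntD]
  | cons p rem' ih =>
    obtain ⟨x, s⟩ := p
    intro pre v rest done t c d hlen hsort hmem hsub hlt
    rw [List.map_cons] at hsort
    have hsort' := (List.pairwise_cons.mp hsort).2
    have hx_le : ∀ b ∈ rem'.map Prod.fst, x ≤ b := (List.pairwise_cons.mp hsort).1
    have hvlt : ∀ u ∈ rest, v < u := (List.pairwise_cons.mp hlt).1
    have hltrest : rest.Pairwise (· < ·) := (List.pairwise_cons.mp hlt).2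
    have e1 : (pre ++ v :: rest).getD pre.length 0 = v := pv_getD_append _ _ _ _
    rw [List.foldl_cons]
    by_cases hxv : x = v
    · subst hxv
      -- pointer stays: bump row k
      have hstep : pvStepA (pre ++ x :: rest)
          (done ++ [x, t, c, d] :: rest.map (fun u => [u, 0, 0, 0]), pre.length) (x, s)
          = (done ++ [x, t + 1, c + (if s = "C" then 1 else 0), d + (if s = "D" then 1 else 0)]
              :: rest.map (fun u => [u, 0, 0, 0]), pre.length) := by
        simp only [pvStepA]
        rw [e1, if_pos rfl, ← hlen, pv_modify_append, pvRow1]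
        by_cases hC : s = "C"
        · rw [if_pos hC, pv_modify_append, pvRow2]
          simp [hC, hlen]
        · rw [if_neg hC]
          by_cases hD : s = "D"
          · rw [if_pos hD, pv_modify_append, pvRow3]
            simp [hC, hD, hlen]
          · rw [if_neg hD]
            simp [hC, hD, hlen]
      rw [hstep]
      have hmem' : ∀ p ∈ rem', p.1 = x ∨ p.1 ∈ rest := fun p hp => hmem p (by simp [hp])
      have hsub' : ∀ u ∈ rest, u ∈ rem'.map Prod.fst := by
        intro u hu
        have := hsub u hu
        rw [List.map_cons] at this
        rcases List.mem_cons.mp this with h | h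
        · exact absurd (h ▸ hvlt u hu) (lt_irrefl _)
        · exact h
      rw [ih pre x rest done (t + 1) (c + (if s = "C" then 1 else 0))
            (d + (if s = "D" then 1 else 0)) hlen hsort' hmem' hsub' hlt]
      have hmapeq : rest.map (fun u => [u, cntT u ((x, s) :: rem'), cntC u ((x, s) :: rem'),
            cntD u ((x, s) :: rem')])
          = rest.map (fun u => [u, cntT u rem', cntC u rem', cntD u rem']) := by
        apply List.map_congr_left; intro u hu
        have hne : ¬ (x = u) := fun h => absurd (h ▸ hvlt u hu) (lt_irrefl _)
        simp [cntT_cons, cntC_cons, cntD_cons, hne]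
      rw [hmapeq, cntT_cons, cntC_cons, cntD_cons]
      simp only [if_pos rfl, true_and]
      by_cases hC : s = "C"
      · simp [hC, add_assoc, add_comm, add_left_comm]
      · by_cases hD : s = "D" <;> simp [hC, hD, add_assoc, add_comm, add_left_comm]
    · -- pointer advances: x is the next distinct level
      cases rest with
      | nil =>
        rcases hmem (x, s) (by simp) with h | h
        · exact absurd h hxv
        · simp at h
      | cons w rest'' =>
        have hwmem : w ∈ x :: rem'.map Prod.fst := by
          have := hsub w (by simp)
          rwa [List.map_cons] at this
        have hxrest : x ∈ w :: rest'' := by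
          rcases hmem (x, s) (by simp) with h | h
          · exact absurd h hxv
          · exact h
        have hxw : x = w := by
          have h1 : x ≤ w := by
            rcases List.mem_cons.mp hwmem with h | h
            · exact h.symm.le
            · exact hx_le w h
          have h2 : w ≤ x := by
            rcases List.mem_cons.mp hxrest with h | h
            · exact h.symm.le
            · exact ((List.pairwise_cons.mp hltrest).1 x h).le
          exact le_antisymm h1 h2
        subst hxw
        have hvnotin : ∀ p ∈ (x, s) :: rem', p.1 ≠ v := by
          intro p hp hpv
          rcases List.mem_cons.mp hp with h | h
          · exact hxv (by rw [h] at hpv; exact hpv)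
          · -- p ∈ rem' with p.1 = v : then x ≤ v but v < x
            have hxlev : x ≤ p.1 := hx_le p.1 (List.mem_map.mpr ⟨p, h, rfl⟩)
            have : v < x := hvlt x (by simp)
            omega
        have hvnot : v ∉ ((x, s) :: rem').map Prod.fst := by
          intro hv
          obtain ⟨p, hp, hpe⟩ := List.mem_map.mp hv
          exact hvnotin p hp hpe
        -- evaluate the step: k becomes pre.length + 1
        have hstep : pvStepA (pre ++ v :: x :: rest'')
            (done ++ [v, t, c, d] :: [x, 0, 0, 0] :: rest''.map (fun u => [u, 0, 0, 0]),
              pre.length) (x, s)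
            = ((done ++ [[v, t, c, d]]) ++ [x, 1, (if s = "C" then 1 else 0), (if s = "D" then 1 else 0)]
                :: rest''.map (fun u => [u, 0, 0, 0]), pre.length + 1) := by
          have e2 : (pre ++ v :: x :: rest'').getD pre.length 0 = v := pv_getD_append _ _ _ _
          have hlen2 : (done ++ [[v, t, c, d]]).length = pre.length + 1 := by simp [hlen]
          have hre : done ++ [v, t, c, d] :: [x, 0, 0, 0] :: rest''.map (fun u => [u, 0, 0, 0])
              = (done ++ [[v, t, c, d]]) ++ [x, 0, 0, 0] :: rest''.map (fun u => [u, 0, 0, 0]) := by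
            simp
          have hvx : ¬ (v = x) := fun h => hxv h.symm
          simp only [pvStepA]
          rw [e2, if_neg hvx, hre, ← hlen2, pv_modify_append, pvRow1]
          by_cases hC : s = "C"
          · rw [if_pos hC, pv_modify_append, pvRow2]
            simp [hC, hlen2]
          · rw [if_neg hC]
            by_cases hD : s = "D"
            · rw [if_pos hD, pv_modify_append, pvRow3]
              simp [hC, hD, hlen2]
            · rw [if_neg hD]
              simp [hC, hD, hlen2]
        simp only [List.map_cons]
        rw [hstep]
        have hassoc : pre ++ v :: x :: rest'' = (pre ++ [v]) ++ x :: rest'' := by simp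
        have hmem' : ∀ p ∈ rem', p.1 = x ∨ p.1 ∈ rest'' := by
          intro p hp
          rcases hmem p (by simp [hp]) with h | h
          · exact absurd h (hvnotin p (by simp [hp]))
          · exact List.mem_cons.mp h
        have hsub' : ∀ u ∈ rest'', u ∈ rem'.map Prod.fst := by
          intro u hu
          have := hsub u (by simp [hu])
          rw [List.map_cons] at this
          rcases List.mem_cons.mp this with h | h
          · exact absurd h ((List.pairwise_cons.mp hltrest).1 u hu).ne'
          · exact h
        have hlen' : (done ++ [[v, t, c, d]]).length = (pre ++ [v]).length := by simp [hlen]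
        rw [hassoc, show pre.length + 1 = (pre ++ [v]).length by simp,
          ih (pre ++ [v]) x rest'' (done ++ [[v, t, c, d]]) 1
              (if s = "C" then 1 else 0) (if s = "D" then 1 else 0) hlen' hsort' hmem' hsub'
              (List.pairwise_cons.mp hlt).2]
        have hmapeq : rest''.map (fun u => [u, cntT u ((x, s) :: rem'), cntC u ((x, s) :: rem'),
              cntD u ((x, s) :: rem')])
            = rest''.map (fun u => [u, cntT u rem', cntC u rem', cntD u rem']) := by
          apply List.map_congr_left; intro u hu
          have hne : ¬ (x = u) := fun h =>
            absurd (h ▸ (List.pairwise_cons.mp hltrest).1 u hu) (lt_irrefl _)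
          simp [cntT_cons, cntC_cons, cntD_cons, hne]
        rw [hmapeq, cntT_zero v _ hvnot, cntC_zero v _ hvnot, cntD_zero v _ hvnot,
          cntT_cons, cntC_cons, cntD_cons]
        simp only [if_pos rfl, true_and]
        by_cases hC : s = "C"
        · simp [hC, add_assoc, add_comm, add_left_comm]
        · by_cases hD : s = "D" <;> simp [hC, hD, add_assoc, add_comm, add_left_comm]

lemma pv_map_fst_pairs (L_i : List Int) (S_i : List String) :
    (pvPairs L_i S_i).map Prod.fst = PySem.List.sorted L_i (fun x => x) false := by
  unfold pvPairs
  rw [List.map_map]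
  apply List.ext_getElem
  · simp [PySem.List.length_sorted]
  · intro i h1 h2
    simp [List.getElem?_eq_getElem h2]

lemma pv_map_range_getD (l : List Int) :
    (List.range l.length).map (fun k => ([l.getD k 0, 0, 0, 0] : List Int))
      = l.map (fun lev => [lev, 0, 0, 0]) := by
  apply List.ext_getElem
  · simp
  · intro i h1 h2
    have h3 : i < l.length := by simpa using h2
    simp [List.getElem?_eq_getElem h3]

lemma pv_alt_eq (L_i : List Int) (S_i : List String) (n : Int) :
    L_distribution_alt L_i S_i n
      = (PySem.List.sorted (PySem.Set.ofList L_i) (fun x => x) false).map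
          (fun lev => [lev, cntT lev (pvPairs L_i S_i), cntC lev (pvPairs L_i S_i),
                       cntD lev (pvPairs L_i S_i)]) := by
  simp only [L_distribution_alt]
  have h1 : (List.range L_i.length).foldl
      (fun (st : PySem.Dict Int Int × PySem.Dict Int Int) i =>
        if S_i.getD i "" = "C"
        then (st.1.modify ((PySem.List.sorted L_i (fun x => x) false).getD i 0) 0 (· + 1), st.2)
        else if S_i.getD i "" = "D"
        then (st.1, st.2.modify ((PySem.List.sorted L_i (fun x => x) false).getD i 0) 0 (· + 1))
        else st)
      (PySem.Dict.empty, PySem.Dict.empty)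
      = (pvPairs L_i S_i).foldl
        (fun (st : PySem.Dict Int Int × PySem.Dict Int Int) p =>
          if p.2 = "C" then (st.1.modify p.1 0 (· + 1), st.2)
          else if p.2 = "D" then (st.1, st.2.modify p.1 0 (· + 1))
          else st)
        (PySem.Dict.empty, PySem.Dict.empty) := by
    unfold pvPairs
    rw [List.foldl_map]
  rw [h1]
  have hF : (fun (st : PySem.Dict Int Int × PySem.Dict Int Int) (p : Int × String) =>
        if p.2 = "C" then (st.1.modify p.1 0 (· + 1), st.2)
        else if p.2 = "D" then (st.1, st.2.modify p.1 0 (· + 1))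
        else st)
      = (fun (st : PySem.Dict Int Int × PySem.Dict Int Int) (p : Int × String) =>
        (if p.2 = "C" then st.1.modify p.1 0 (· + 1) else st.1,
         if p.2 = "D" then st.2.modify p.1 0 (· + 1) else st.2)) := by
    funext st p
    by_cases hC : p.2 = "C"
    · simp [hC]
    · by_cases hD : p.2 = "D" <;> simp [hC, hD]
  rw [hF, PySem.List.foldl_prod_mk
    (f := fun (d : PySem.Dict Int Int) (p : Int × String) =>
      if p.2 = "C" then d.modify p.1 0 (· + 1) else d)
    (g := fun (d : PySem.Dict Int Int) (p : Int × String) =>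
      if p.2 = "D" then d.modify p.1 0 (· + 1) else d)]
  have hrow : (fun lev => ([lev,
        (L_i.foldl (fun d lev => d.insert lev (d.getD lev 0 + 1)) PySem.Dict.empty).getD lev 0,
        ((pvPairs L_i S_i).foldl (fun (d : PySem.Dict Int Int) p =>
            if p.2 = "C" then d.modify p.1 0 (· + 1) else d) PySem.Dict.empty).getD lev 0,
        ((pvPairs L_i S_i).foldl (fun (d : PySem.Dict Int Int) p =>
            if p.2 = "D" then d.modify p.1 0 (· + 1) else d) PySem.Dict.empty).getD lev 0] : List Int))
      = (fun lev => [lev, cntT lev (pvPairs L_i S_i), cntC lev (pvPairs L_i S_i),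
                     cntD lev (pvPairs L_i S_i)]) := by
    funext lev
    have hfreq : (L_i.foldl (fun d lev => d.insert lev (d.getD lev 0 + 1))
        PySem.Dict.empty).getD lev 0 = cntT lev (pvPairs L_i S_i) := by
      rw [PySem.Dict.getD_foldl_insert_add_one]
      rw [cntT, pv_map_fst_pairs]
      rw [(PySem.List.sorted_perm L_i (fun x => x) false).count_eq lev]
      simp
    have hc : ((pvPairs L_i S_i).foldl (fun (d : PySem.Dict Int Int) p =>
        if p.2 = "C" then d.modify p.1 0 (· + 1) else d) PySem.Dict.empty).getD lev 0
        = cntC lev (pvPairs L_i S_i) := by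
      rw [PySem.List.foldl_ite_eq_foldl_filter (p := fun (p : Int × String) => p.2 = "C")
        (f := fun (d : PySem.Dict Int Int) p => d.modify p.1 0 (· + 1))]
      rw [← List.foldl_map (f := Prod.fst)
        (g := fun (d : PySem.Dict Int Int) x => d.modify x 0 (· + 1))]
      rw [PySem.Dict.getD_foldl_modify_add_one]
      simp [cntC]
    have hd : ((pvPairs L_i S_i).foldl (fun (d : PySem.Dict Int Int) p =>
        if p.2 = "D" then d.modify p.1 0 (· + 1) else d) PySem.Dict.empty).getD lev 0
        = cntD lev (pvPairs L_i S_i) := by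
      rw [PySem.List.foldl_ite_eq_foldl_filter (p := fun (p : Int × String) => p.2 = "D")
        (f := fun (d : PySem.Dict Int Int) p => d.modify p.1 0 (· + 1))]
      rw [← List.foldl_map (f := Prod.fst)
        (g := fun (d : PySem.Dict Int Int) x => d.modify x 0 (· + 1))]
      rw [PySem.Dict.getD_foldl_modify_add_one]
      simp [cntD]
    rw [hfreq, hc, hd]
  rw [hrow]

-- ===== VERDICT (by name: the statement is the Claim_ definition above) =====
theorem L_distribution_spec : Claim_equal_L_distribution := by
  intro L_i S_i n _ _
  unfold Spec_L_distribution
  rw [pv_alt_eq]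
  simp only [L_distribution]
  rw [PySem.List.foldl_append_singleton_eq_map, List.nil_append, pv_map_range_getD]
  have h1 : (List.range L_i.length).foldl
      (fun st i => pvStepA (PySem.List.sorted (PySem.Set.ofList L_i) (fun x => x) false) st
        ((PySem.List.sorted L_i (fun x => x) false).getD i 0, S_i.getD i ""))
      ((PySem.List.sorted (PySem.Set.ofList L_i) (fun x => x) false).map
        (fun lev => [lev, 0, 0, 0]), 0)
      = (pvPairs L_i S_i).foldl
        (pvStepA (PySem.List.sorted (PySem.Set.ofList L_i) (fun x => x) false))
        ((PySem.List.sorted (PySem.Set.ofList L_i) (fun x => x) false).map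
          (fun lev => [lev, 0, 0, 0]), 0) := by
    unfold pvPairs
    rw [List.foldl_map]
  rw [h1]
  have hsortp : ((pvPairs L_i S_i).map Prod.fst).Pairwise (· ≤ ·) := by
    rw [pv_map_fst_pairs]
    exact PySem.List.sorted_pairwise L_i (fun x => x)
  have hmemsim : ∀ p ∈ pvPairs L_i S_i,
      p.1 ∈ PySem.List.sorted (PySem.Set.ofList L_i) (fun x => x) false := by
    intro p hp
    have : p.1 ∈ (pvPairs L_i S_i).map Prod.fst := List.mem_map.mpr ⟨p, hp, rfl⟩
    rw [pv_map_fst_pairs] at this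
    rw [PySem.List.mem_sorted] at this ⊢
    exact (PySem.Set.mem_ofList L_i p.1).mpr this
  have hsubsim : ∀ u ∈ PySem.List.sorted (PySem.Set.ofList L_i) (fun x => x) false,
      u ∈ (pvPairs L_i S_i).map Prod.fst := by
    intro u hu
    rw [pv_map_fst_pairs, PySem.List.mem_sorted]
    rw [PySem.List.mem_sorted] at hu
    exact (PySem.Set.mem_ofList L_i u).mp hu
  have hltsim : (PySem.List.sorted (PySem.Set.ofList L_i) (fun x => x) false).Pairwise (· < ·) := by
    have hle := PySem.List.sorted_pairwise (PySem.Set.ofList L_i) (fun x => x)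
    have hnd : (PySem.List.sorted (PySem.Set.ofList L_i) (fun x => x) false).Nodup :=
      ((PySem.List.sorted_perm (PySem.Set.ofList L_i) (fun x => x) false).nodup_iff).mpr
        (PySem.Set.nodup_ofList L_i)
    exact (List.Pairwise.and hle hnd).imp (fun h => lt_of_le_of_ne h.1 h.2)
  cases hsim : PySem.List.sorted (PySem.Set.ofList L_i) (fun x => x) false with
  | nil =>
    have hL : L_i = [] := by
      cases hLc : L_i with
      | nil => rfl
      | cons a as =>
        exfalso
        have : a ∈ PySem.List.sorted (PySem.Set.ofList L_i) (fun x => x) false := by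
          rw [PySem.List.mem_sorted]
          exact (PySem.Set.mem_ofList L_i a).mpr (by simp [hLc])
        simp [hsim] at this
    subst hL
    simp [pvPairs]
  | cons v rest =>
    rw [hsim] at hmemsim hsubsim hltsim
    have := pv_loopA (pvPairs L_i S_i) [] v rest [] 0 0 0 rfl hsortp
      (fun p hp => List.mem_cons.mp (hmemsim p hp))
      (fun u hu => hsubsim u (List.mem_cons_of_mem v hu))
      hltsim
    simp only [List.nil_append, List.length_nil, List.map_cons] at this ⊢
    rw [this]
    simp
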